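-- pv_equiv track=rewrite | github.com/yingl/LintCodeInPython | largest-subarray.py | cmp_array
-- ===== SOURCE A (Python) =====
-- def cmp_array(A, s_1, s_2, count):
--     i = 0
--     while i < count:
--         if A[s_1 + i] < A[s_2 + i]:
--             return -1
--         elif A[s_1 + i] > A[s_2 + i]:
--             return 1
--         else:
--             i += 1
--     return 0
-- ===== SOURCE B (Python) =====
-- def cmp_array(A, s_1, s_2, count):
--     n = max(count, 0)
--     a = A[s_1:s_1 + n]
--     b = A[s_2:s_2 + n]
--     return (a > b) - (a < b)
-- ===== Notes on version B (the rewrite author's own statement) =====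
-- stated objective: idiomatic
-- what changed: B materializes the two windows as slices and returns the sign of Python's built-in lexicographic list comparison instead of hand-stepping an index loop with a three-way branch.
-- outside the precondition, e.g. on cmp_array([1, 2, 3], -1, 0, 1): A returns 1, B returns -1; on cmp_array([1, 1, 2], 0, 1, 3): A returns -1, B returns -1
import Mathlib
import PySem

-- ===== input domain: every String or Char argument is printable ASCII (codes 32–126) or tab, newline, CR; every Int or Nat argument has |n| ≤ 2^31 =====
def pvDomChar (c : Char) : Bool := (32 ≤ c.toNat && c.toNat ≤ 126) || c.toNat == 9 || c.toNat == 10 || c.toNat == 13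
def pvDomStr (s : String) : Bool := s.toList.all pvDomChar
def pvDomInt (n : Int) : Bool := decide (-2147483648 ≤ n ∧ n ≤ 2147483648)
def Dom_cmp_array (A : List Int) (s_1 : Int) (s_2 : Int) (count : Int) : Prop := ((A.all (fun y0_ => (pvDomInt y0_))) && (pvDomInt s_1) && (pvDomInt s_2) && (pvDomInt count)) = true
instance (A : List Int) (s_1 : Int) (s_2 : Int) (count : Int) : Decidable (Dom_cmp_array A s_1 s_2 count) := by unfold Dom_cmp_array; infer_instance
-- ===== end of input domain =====

-- B replaces A's hand-written index loop by slicing out the two windows and taking the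
-- sign of Python's built-in lexicographic list comparison (idiomatic; same cost).

-- ===== PORT A =====
-- the while loop, one recursive call per iteration; A[s+i] is pyGetD (IndexError cases excluded by Pre_)
def cmpA_loop (A : List Int) (s_1 : Int) (s_2 : Int) (count : Int) (i : Int) : Int :=
  if _h : i < count then
    if PySem.List.pyGetD A (s_1 + i) 0 < PySem.List.pyGetD A (s_2 + i) 0 then -1
    else if PySem.List.pyGetD A (s_1 + i) 0 > PySem.List.pyGetD A (s_2 + i) 0 then 1
    else cmpA_loop A s_1 s_2 count (i + 1)
  else 0
termination_by (count - i).toNat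
decreasing_by omega

def cmp_array (A : List Int) (s_1 : Int) (s_2 : Int) (count : Int) : Int :=
  cmpA_loop A s_1 s_2 count 0

-- ===== PORT B =====
-- Python's lexicographic `<` on lists of ints (a shorter strict prefix is smaller)
def pyListLt : List Int → List Int → Bool
  | _, [] => false
  | [], _ :: _ => true
  | x :: xs, y :: ys => if x < y then true else if y < x then false else pyListLt xs ys

def cmp_array_alt (A : List Int) (s_1 : Int) (s_2 : Int) (count : Int) : Int :=
  let n := max count 0
  let a := PySem.List.slice A (some s_1) (some (s_1 + n))
  let b := PySem.List.slice A (some s_2) (some (s_2 + n))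
  (if pyListLt b a then (1 : Int) else 0) - (if pyListLt a b then (1 : Int) else 0)

-- ===== PRECONDITION & SPEC =====
-- For 0 < count, Pre_ admits inputs whose windows are honestly comparable (in-bounds or
-- fully negative, equal starts, or in-range starts whose first cells already differ); it
-- excludes windows that overrun the array or wrap across index 0 undetected — there A
-- either raises IndexError mid-scan or returns via negative-index wraparound / an early
-- mismatch, accidents of the index loop that a subarray comparison is never called with.
def Pre_cmp_array (A : List Int) (s_1 : Int) (s_2 : Int) (count : Int) : Prop :=
  0 < count →
    (((0 ≤ s_1 ∧ s_1 < (A.length : Int)) ∨ (-(A.length : Int) ≤ s_1 ∧ s_1 < 0 ∧ (A.length : Int) ≤ s_1 + count)) ∧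
     ((0 ≤ s_2 ∧ s_2 < (A.length : Int)) ∨ (-(A.length : Int) ≤ s_2 ∧ s_2 < 0 ∧ (A.length : Int) ≤ s_2 + count)) ∧
      PySem.List.pyGetD A s_1 0 ≠ PySem.List.pyGetD A s_2 0) ∨
    (s_1 = s_2 ∧ -(A.length : Int) ≤ s_1 ∧ s_1 + count ≤ (A.length : Int)) ∨
    (((0 ≤ s_1 ∧ s_1 + count ≤ (A.length : Int)) ∨ (-(A.length : Int) ≤ s_1 ∧ s_1 + count < 0)) ∧
     ((0 ≤ s_2 ∧ s_2 + count ≤ (A.length : Int)) ∨ (-(A.length : Int) ≤ s_2 ∧ s_2 + count < 0)))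
instance (A : List Int) (s_1 : Int) (s_2 : Int) (count : Int) : Decidable (Pre_cmp_array A s_1 s_2 count) := by unfold Pre_cmp_array; infer_instance

def pvWitness_cmp_array : List Int × Int × Int × Int := ([3, 1, 2, 1, 2], 1, 3, 2)

def Spec_cmp_array (A : List Int) (s_1 : Int) (s_2 : Int) (count : Int) (out : Int) : Prop := out = cmp_array_alt A s_1 s_2 count
instance (A : List Int) (s_1 : Int) (s_2 : Int) (count : Int) (out : Int) : Decidable (Spec_cmp_array A s_1 s_2 count out) := by unfold Spec_cmp_array; infer_instance

-- ===== CLAIM (what is proved, stated in full; the proofs are below) =====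
def Claim_equal_cmp_array : Prop := ∀ (A : List Int) (s_1 : Int) (s_2 : Int) (count : Int), Dom_cmp_array A s_1 s_2 count → Pre_cmp_array A s_1 s_2 count → Spec_cmp_array A s_1 s_2 count (cmp_array A s_1 s_2 count)

-- ===== LEMMAS AND PROOFS =====

theorem drop_take_cons (A : List Int) (k n : Nat) (hk : k < A.length) :
    (A.drop k).take (n + 1) = A[k] :: (A.drop (k + 1)).take n := by
  rw [List.drop_eq_getElem_cons hk, List.take_succ_cons]

-- A's loop on an in-bounds, non-negative window equals the three-way sign of pyListLt on the windows
theorem cmpA_loop_eq (n : Nat) : ∀ (A : List Int) (s_1 s_2 count i : Int),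
    0 ≤ i → (count - i).toNat = n →
    0 ≤ s_1 → 0 ≤ s_2 → s_1 + count ≤ A.length → s_2 + count ≤ A.length →
    cmpA_loop A s_1 s_2 count i =
      (if pyListLt ((A.drop (s_2 + i).toNat).take n) ((A.drop (s_1 + i).toNat).take n) then (1 : Int) else 0) -
      (if pyListLt ((A.drop (s_1 + i).toNat).take n) ((A.drop (s_2 + i).toNat).take n) then (1 : Int) else 0) := by
  induction n with
  | zero =>
    intro A s_1 s_2 count i hi hn h1 h2 hb1 hb2
    unfold cmpA_loop
    rw [dif_neg (by omega)]
    simp [pyListLt]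
  | succ m ih =>
    intro A s_1 s_2 count i hi hn h1 h2 hb1 hb2
    have hic : i < count := by omega
    have hk1 : (s_1 + i).toNat < A.length := by omega
    have hk2 : (s_2 + i).toNat < A.length := by omega
    have e1 : (A.drop (s_1 + i).toNat).take (m + 1) = A[(s_1 + i).toNat] :: (A.drop ((s_1 + i).toNat + 1)).take m :=
      drop_take_cons A _ m hk1
    have e2 : (A.drop (s_2 + i).toNat).take (m + 1) = A[(s_2 + i).toNat] :: (A.drop ((s_2 + i).toNat + 1)).take m :=
      drop_take_cons A _ m hk2
    have g1 : PySem.List.pyGetD A (s_1 + i) 0 = A[(s_1 + i).toNat] :=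
      PySem.List.pyGetD_eq_getElem A 0 (by omega) (by omega)
    have g2 : PySem.List.pyGetD A (s_2 + i) 0 = A[(s_2 + i).toNat] :=
      PySem.List.pyGetD_eq_getElem A 0 (by omega) (by omega)
    conv_lhs => rw [cmpA_loop]
    rw [dif_pos hic, g1, g2, e1, e2]
    have h1n : (s_1 + (i + 1)).toNat = (s_1 + i).toNat + 1 := by omega
    have h2n : (s_2 + (i + 1)).toNat = (s_2 + i).toNat + 1 := by omega
    by_cases c1 : A[(s_1 + i).toNat] < A[(s_2 + i).toNat]
    · simp [pyListLt, c1, show ¬ A[(s_2 + i).toNat] < A[(s_1 + i).toNat] by omega]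
    · by_cases c2 : A[(s_2 + i).toNat] < A[(s_1 + i).toNat]
      · simp [pyListLt, c1, c2]
      · simp only [pyListLt, if_neg c1, if_neg c2, gt_iff_lt]
        rw [ih A s_1 s_2 count (i + 1) (by omega) (by omega) h1 h2 hb1 hb2, h1n, h2n]

-- the loop only looks at A[s+j] for i ≤ j < count, so starts reading the same cells give the same run
theorem cmpA_loop_congr (n : Nat) : ∀ (A : List Int) (s_1 s_2 t_1 t_2 count i : Int),
    (count - i).toNat = n →
    (∀ j : Int, i ≤ j → j < count → PySem.List.pyGetD A (s_1 + j) 0 = PySem.List.pyGetD A (t_1 + j) 0) →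
    (∀ j : Int, i ≤ j → j < count → PySem.List.pyGetD A (s_2 + j) 0 = PySem.List.pyGetD A (t_2 + j) 0) →
    cmpA_loop A s_1 s_2 count i = cmpA_loop A t_1 t_2 count i := by
  induction n with
  | zero =>
    intro A s_1 s_2 t_1 t_2 count i hn _ _
    unfold cmpA_loop
    rw [dif_neg (by omega), dif_neg (by omega)]
  | succ m ih =>
    intro A s_1 s_2 t_1 t_2 count i hn h1 h2
    have hic : i < count := by omega
    conv_lhs => rw [cmpA_loop]
    conv_rhs => rw [cmpA_loop]
    rw [dif_pos hic, dif_pos hic, h1 i le_rfl hic, h2 i le_rfl hic]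
    by_cases c1 : PySem.List.pyGetD A (t_1 + i) 0 < PySem.List.pyGetD A (t_2 + i) 0
    · rw [if_pos c1, if_pos c1]
    · rw [if_neg c1, if_neg c1]
      by_cases c2 : PySem.List.pyGetD A (t_1 + i) 0 > PySem.List.pyGetD A (t_2 + i) 0
      · rw [if_pos c2, if_pos c2]
      · rw [if_neg c2, if_neg c2]
        exact ih A s_1 s_2 t_1 t_2 count (i + 1) (by omega)
          (fun j hj hjc => h1 j (by omega) hjc) (fun j hj hjc => h2 j (by omega) hjc)

theorem clampIdx_neg (n : Nat) (s : Int) (h1 : -(n : Int) ≤ s) (h2 : s < 0) :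
    PySem.List.clampIdx n s = ((n : Int) + s).toNat := by
  unfold PySem.List.clampIdx
  split_ifs <;> omega

theorem slice_clamp (A : List Int) (s e : Int) :
    PySem.List.slice A (some s) (some e) =
      (A.drop (PySem.List.clampIdx A.length s)).take (PySem.List.clampIdx A.length e - PySem.List.clampIdx A.length s) := by
  rfl

theorem pyGetD_shift (A : List Int) (i : Int) (h1 : -(A.length : Int) ≤ i) (h2 : i < 0) :
    PySem.List.pyGetD A i 0 = PySem.List.pyGetD A ((A.length : Int) + i) 0 := by
  have hk : i = -(((-i).toNat : Nat) : Int) := by omega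
  rw [hk, PySem.List.pyGetD_neg_natCast A (-i).toNat 0 (by omega) (by omega),
    PySem.List.pyGetD_eq_getElem A 0 (by omega) (by omega)]
  congr 1
  omega

-- an admitted window (non-negative in-bounds, or fully negative) reads the same cells as a
-- non-negative in-bounds window starting at t, and B's slice is exactly that window
theorem window_slice (A : List Int) (s count : Int) (hc : 0 < count)
    (hok : (0 ≤ s ∧ s + count ≤ (A.length : Int)) ∨ (-(A.length : Int) ≤ s ∧ s + count < 0)) :
    ∃ t : Int, 0 ≤ t ∧ t + count ≤ (A.length : Int) ∧
      (∀ j : Int, 0 ≤ j → j < count → PySem.List.pyGetD A (s + j) 0 = PySem.List.pyGetD A (t + j) 0) ∧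
      PySem.List.slice A (some s) (some (s + count)) = (A.drop t.toNat).take count.toNat := by
  rcases hok with ⟨hs, hb⟩ | ⟨hs, hb⟩
  · refine ⟨s, hs, hb, fun j _ _ => rfl, ?_⟩
    rw [PySem.List.slice_toNat A hs (by omega),
      show (s + count).toNat - s.toNat = count.toNat from by omega]
  · refine ⟨(A.length : Int) + s, by omega, by omega, ?_, ?_⟩
    · intro j hj0 hjc
      rw [pyGetD_shift A (s + j) (by omega) (by omega), ← add_assoc]
    · rw [slice_clamp, clampIdx_neg A.length s hs (by omega),
        clampIdx_neg A.length (s + count) (by omega) hb,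
        show ((A.length : Int) + (s + count)).toNat - ((A.length : Int) + s).toNat = count.toNat from by omega]

-- comparing a window with itself yields 0, whatever the indices
theorem pyListLt_irrefl (a : List Int) : pyListLt a a = false := by
  induction a with
  | nil => rfl
  | cons x xs ih => simp [pyListLt, ih]

theorem cmpA_loop_refl (n : Nat) : ∀ (A : List Int) (s count i : Int),
    (count - i).toNat = n → cmpA_loop A s s count i = 0 := by
  induction n with
  | zero =>
    intro A s count i hn
    unfold cmpA_loop
    rw [dif_neg (by omega)]
  | succ m ih =>
    intro A s count i hn
    conv_lhs => rw [cmpA_loop]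
    rw [dif_pos (by omega), if_neg (by omega), if_neg (by omega)]
    exact ih A s count (i + 1) (by omega)

theorem clampIdx_nonneg (n : Nat) (s : Int) (h1 : 0 ≤ s) :
    PySem.List.clampIdx n s = min s.toNat n := by
  unfold PySem.List.clampIdx
  split_ifs <;> omega

-- a start whose first cell A reads and which is also the head of B's slice
theorem head_slice (A : List Int) (s count : Int) (hc : 0 < count)
    (hok : (0 ≤ s ∧ s < (A.length : Int)) ∨ (-(A.length : Int) ≤ s ∧ s < 0 ∧ (A.length : Int) ≤ s + count)) :
    ∃ (x : Int) (rest : List Int),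
      PySem.List.pyGetD A s 0 = x ∧
      PySem.List.slice A (some s) (some (s + count)) = x :: rest := by
  rcases hok with ⟨hs, hl⟩ | ⟨hs, hneg, hl⟩
  · refine ⟨A[s.toNat]'(by omega), (A.drop (s.toNat + 1)).take ((s + count).toNat - s.toNat - 1),
      PySem.List.pyGetD_eq_getElem A 0 hs (by omega), ?_⟩
    rw [PySem.List.slice_toNat A hs (by omega),
      show (s + count).toNat - s.toNat = ((s + count).toNat - s.toNat - 1) + 1 from by omega,
      drop_take_cons A s.toNat _ (by omega)]
    congr 2
    try omega
  · have hk : ((A.length : Int) + s).toNat < A.length := by omega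
    refine ⟨A[((A.length : Int) + s).toNat]'hk,
      (A.drop (((A.length : Int) + s).toNat + 1)).take (A.length - ((A.length : Int) + s).toNat - 1), ?_, ?_⟩
    · rw [pyGetD_shift A s (by omega) hneg]
      exact PySem.List.pyGetD_eq_getElem A 0 (by omega) (by omega)
    · rw [slice_clamp, clampIdx_neg A.length s hs hneg,
        show PySem.List.clampIdx A.length (s + count) = A.length from by
          rw [clampIdx_nonneg A.length (s + count) (by omega)]; omega,
        show A.length - ((A.length : Int) + s).toNat = (A.length - ((A.length : Int) + s).toNat - 1) + 1 from by omega,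
        drop_take_cons A _ _ hk]
      congr 2
      try omega

theorem slice_degenerate (A : List Int) (s : Int) : PySem.List.slice A (some s) (some s) = [] := by
  simp [PySem.List.slice]

-- ===== VERDICT (by name: the statement is the Claim_ definition above) =====
theorem cmp_array_spec : Claim_equal_cmp_array := by
  intro A s_1 s_2 count _hdom hpre
  unfold Spec_cmp_array cmp_array cmp_array_alt
  show cmpA_loop A s_1 s_2 count 0 =
    (if pyListLt (PySem.List.slice A (some s_2) (some (s_2 + max count 0)))
        (PySem.List.slice A (some s_1) (some (s_1 + max count 0))) then (1 : Int) else 0) -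
    (if pyListLt (PySem.List.slice A (some s_1) (some (s_1 + max count 0)))
        (PySem.List.slice A (some s_2) (some (s_2 + max count 0))) then (1 : Int) else 0)
  by_cases hc : 0 < count
  · rcases hpre hc with ⟨ok1, hne2⟩ | ⟨heq, _, _⟩ | ⟨ok1, ok2⟩
    · -- each start's first cell is readable and is the head of its slice; the first cells differ
      obtain ⟨ok2, hne⟩ := hne2
      obtain ⟨x, xs, hx, sa⟩ := head_slice A s_1 count hc ok1
      obtain ⟨y, ys, hy, sb⟩ := head_slice A s_2 count hc ok2
      rw [hx, hy] at hne
      have hmax : max count 0 = count := by omega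
      conv_lhs => rw [cmpA_loop]
      rw [dif_pos (by omega : (0:Int) < count), add_zero, add_zero, hx, hy, hmax, sa, sb]
      by_cases hlt : x < y
      · rw [if_pos hlt]
        simp [pyListLt, hlt, show ¬ y < x from by omega]
      · have hgt : y < x := by omega
        rw [if_neg hlt, if_pos (by omega : x > y)]
        simp [pyListLt, hlt, hgt]
    · rw [heq, cmpA_loop_refl count.toNat A s_2 count 0 (by omega), pyListLt_irrefl]
      simp
    obtain ⟨t1, ht1, htb1, hg1, hsl1⟩ := window_slice A s_1 count hc ok1
    obtain ⟨t2, ht2, htb2, hg2, hsl2⟩ := window_slice A s_2 count hc ok2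
    have hmax : max count 0 = count := by omega
    rw [hmax, hsl1, hsl2,
      cmpA_loop_congr count.toNat A s_1 s_2 t1 t2 count 0 (by omega)
        (fun j hj hjc => hg1 j hj hjc) (fun j hj hjc => hg2 j hj hjc),
      cmpA_loop_eq count.toNat A t1 t2 count 0 le_rfl (by omega) ht1 ht2 htb1 htb2,
      show (t1 + 0).toNat = t1.toNat from by omega,
      show (t2 + 0).toNat = t2.toNat from by omega]
  · have hmax : max count 0 = 0 := by omega
    have hz : cmpA_loop A s_1 s_2 count 0 = 0 := by
      unfold cmpA_loop
      rw [dif_neg (by omega)]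
    rw [hz, hmax]
    simp only [add_zero, slice_degenerate, pyListLt]
    simp
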